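-- pv_equiv track=rewrite | github.com/waiyanzt/dhn_nclp | train_lp.py | resolve_layers_config
-- ===== SOURCE A (Python) =====
-- def resolve_layers_config(layers_config, feat_dim):
--     """Replace any indim == -1 with the running output dim (in_dim for layer 0)."""
--     out = []
--     prev_out = feat_dim
--     for layer in layers_config:
--         new_layer = {}
--         layer_out = 0
--         for kernel_name, vals in layer.items():
--             indim, outdim, ks = vals
--             if indim == -1:
--                 indim = prev_out
--             new_layer[kernel_name] = (indim, outdim, ks)
--             layer_out += outdim
--         out.append(new_layer)
--         prev_out = layer_out
--     return out
-- ===== SOURCE B (Python) =====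
-- def resolve_layers_config(layers_config, feat_dim):
--     """Replace any indim == -1 with the running output dim (in_dim for layer 0)."""
--     dims = [feat_dim]
--     for layer in layers_config:
--         dims.append(sum(outdim for (indim, outdim, ks) in layer.values()))
--     return [
--         {k: (dims[i] if indim == -1 else indim, outdim, ks)
--          for k, (indim, outdim, ks) in layer.items()}
--         for i, layer in enumerate(layers_config)
--     ]
-- ===== Notes on version B (the rewrite author's own statement) =====
-- stated objective: alternative
-- what changed: Replaces the single accumulator-threaded loop by two passes: a table of running input dims (feat_dim followed by each layer's outdim sum) built first, then a separate rebuild pass that maps each layer with its table entry.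
import Mathlib
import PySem

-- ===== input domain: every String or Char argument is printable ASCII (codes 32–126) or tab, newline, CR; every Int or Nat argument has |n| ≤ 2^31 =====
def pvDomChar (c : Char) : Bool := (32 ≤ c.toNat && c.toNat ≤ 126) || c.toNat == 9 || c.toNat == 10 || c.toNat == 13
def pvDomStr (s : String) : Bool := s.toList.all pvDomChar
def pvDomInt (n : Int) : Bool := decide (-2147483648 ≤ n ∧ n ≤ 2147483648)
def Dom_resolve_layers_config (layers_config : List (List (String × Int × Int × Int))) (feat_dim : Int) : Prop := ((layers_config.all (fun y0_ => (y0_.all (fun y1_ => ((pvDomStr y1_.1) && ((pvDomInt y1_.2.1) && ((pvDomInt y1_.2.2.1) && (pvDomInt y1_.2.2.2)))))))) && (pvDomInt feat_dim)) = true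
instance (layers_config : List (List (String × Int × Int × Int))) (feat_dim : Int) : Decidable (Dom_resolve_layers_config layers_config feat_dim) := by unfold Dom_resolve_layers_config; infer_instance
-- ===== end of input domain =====

-- B restructures A's single accumulator-threaded pass into a table pass (running input dims) plus a rebuild pass; equivalence of return values is proved.

-- ===== PORT A =====
-- A: one loop threading (out, prev_out); per layer an inner loop threading (new_layer dict, layer_out sum).
def resolve_layers_config (layers_config : List (List (String × Int × Int × Int))) (feat_dim : Int) : List (List (String × Int × Int × Int)) :=
  (layers_config.foldl
    (fun (acc : List (List (String × Int × Int × Int)) × Int) layer =>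
      let r := layer.foldl
        (fun (st : PySem.Dict String (Int × Int × Int) × Int) kv =>
          let indim := if kv.2.1 = -1 then acc.2 else kv.2.1
          (st.1.insert kv.1 (indim, kv.2.2.1, kv.2.2.2), st.2 + kv.2.2.1))
        (PySem.Dict.empty, 0)
      (acc.1 ++ [r.1.items], r.2))
    ([], feat_dim)).1

-- ===== PORT B =====
-- B: first pass builds dims = feat_dim :: per-layer outdim sums; second pass rebuilds each layer zipped with its dims entry.
def resolve_layers_config_alt (layers_config : List (List (String × Int × Int × Int))) (feat_dim : Int) : List (List (String × Int × Int × Int)) :=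
  let dims := feat_dim :: layers_config.map (fun layer => (layer.map (fun kv => kv.2.2.1)).sum)
  (layers_config.zip dims).map (fun p =>
    (p.1.foldl
      (fun (d : PySem.Dict String (Int × Int × Int)) kv =>
        d.insert kv.1 (if kv.2.1 = -1 then p.2 else kv.2.1, kv.2.2.1, kv.2.2.2))
      PySem.Dict.empty).items)

-- ===== PRECONDITION & SPEC =====
def Spec_resolve_layers_config (layers_config : List (List (String × Int × Int × Int))) (feat_dim : Int) (out : List (List (String × Int × Int × Int))) : Prop := out = resolve_layers_config_alt layers_config feat_dim
instance (layers_config : List (List (String × Int × Int × Int))) (feat_dim : Int) (out : List (List (String × Int × Int × Int))) : Decidable (Spec_resolve_layers_config layers_config feat_dim out) := by unfold Spec_resolve_layers_config; infer_instance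

-- ===== CLAIM (what is proved, stated in full; the proofs are below) =====
def Claim_equal_resolve_layers_config : Prop := ∀ (layers_config : List (List (String × Int × Int × Int))) (feat_dim : Int), Dom_resolve_layers_config layers_config feat_dim → Spec_resolve_layers_config layers_config feat_dim (resolve_layers_config layers_config feat_dim)

-- ===== LEMMAS AND PROOFS =====

-- A's inner pair-fold splits into B's dict-fold and the outdim sum.
theorem inner_split (prev : Int) (layer : List (String × Int × Int × Int))
    (d0 : PySem.Dict String (Int × Int × Int)) (s0 : Int) :
    layer.foldl
      (fun (st : PySem.Dict String (Int × Int × Int) × Int) kv =>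
        (st.1.insert kv.1 (if kv.2.1 = -1 then prev else kv.2.1, kv.2.2.1, kv.2.2.2), st.2 + kv.2.2.1))
      (d0, s0)
    = (layer.foldl
        (fun (d : PySem.Dict String (Int × Int × Int)) kv =>
          d.insert kv.1 (if kv.2.1 = -1 then prev else kv.2.1, kv.2.2.1, kv.2.2.2)) d0,
       s0 + (layer.map (fun kv => kv.2.2.1)).sum) := by
  induction layer generalizing d0 s0 with
  | nil => simp
  | cons kv rest ih =>
    simp only [List.foldl_cons, List.map_cons, List.sum_cons, ih]
    ring_nf

-- A's outer fold equals B's zip/map, for any accumulated prefix.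
theorem outer_eq (layers_config : List (List (String × Int × Int × Int)))
    (acc : List (List (String × Int × Int × Int))) (fd : Int) :
    (layers_config.foldl
      (fun (acc : List (List (String × Int × Int × Int)) × Int) layer =>
        let r := layer.foldl
          (fun (st : PySem.Dict String (Int × Int × Int) × Int) kv =>
            let indim := if kv.2.1 = -1 then acc.2 else kv.2.1
            (st.1.insert kv.1 (indim, kv.2.2.1, kv.2.2.2), st.2 + kv.2.2.1))
          (PySem.Dict.empty, 0)
        (acc.1 ++ [r.1.items], r.2))
      (acc, fd)).1
    = acc ++ (layers_config.zip (fd :: layers_config.map (fun layer => (layer.map (fun kv => kv.2.2.1)).sum))).map (fun p =>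
        (p.1.foldl
          (fun (d : PySem.Dict String (Int × Int × Int)) kv =>
            d.insert kv.1 (if kv.2.1 = -1 then p.2 else kv.2.1, kv.2.2.1, kv.2.2.2))
          PySem.Dict.empty).items) := by
  induction layers_config generalizing acc fd with
  | nil => simp
  | cons layer rest ih =>
    simp only [List.foldl_cons, List.map_cons, List.zip_cons_cons, List.map_cons]
    rw [inner_split]
    simp only [zero_add]
    rw [ih]
    simp

-- ===== VERDICT (by name: the statement is the Claim_ definition above) =====
theorem resolve_layers_config_spec : Claim_equal_resolve_layers_config := by
  intro lc fd _
  show resolve_layers_config lc fd = resolve_layers_config_alt lc fd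
  unfold resolve_layers_config resolve_layers_config_alt
  simpa using outer_eq lc [] fd
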